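-- pv_equiv track=rewrite | github.com/hannoobz/domain-specific-computation | model.py | _parse_drug_type
-- ===== SOURCE A (Python) =====
-- def _parse_drug_type(drug_type_input):
--     drug_type_input = list(drug_type_input.split(" "))
--     active_drugs_map = {"RIF": False, "INH": False, "PZA": False, "EMB": False}
--
--     if isinstance(drug_type_input, str):
--         drug_upper = drug_type_input.upper()
--         if drug_upper in active_drugs_map:
--             active_drugs_map[drug_upper] = True
--     elif isinstance(drug_type_input, list):
--         for drug_str in drug_type_input:
--             drug_upper = drug_str.upper()
--             if drug_upper in active_drugs_map:
--                 active_drugs_map[drug_upper] = True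
--     return active_drugs_map
-- ===== SOURCE B (Python) =====
-- def _parse_drug_type(drug_type_input):
--     # Single streaming character scan: no split(), no dict mutated in a loop.
--     rif = inh = pza = emb = False
--     word = ""
--     for ch in drug_type_input + " ":
--         if ch == " ":
--             w = word.upper()
--             rif = rif or w == "RIF"
--             inh = inh or w == "INH"
--             pza = pza or w == "PZA"
--             emb = emb or w == "EMB"
--             word = ""
--         else:
--             word += ch
--     return {"RIF": rif, "INH": inh, "PZA": pza, "EMB": emb}
-- ===== Notes on version B (the rewrite author's own statement) =====
-- stated objective: alternative
-- what changed: Replaces A's split()-then-loop-over-tokens-mutating-a-flag-dict with a single streaming character scan over the input plus a sentinel space, accumulating the current word and or-ing four boolean flags at each word boundary; no split(), no dict is built or mutated during the loop.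
import Mathlib
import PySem

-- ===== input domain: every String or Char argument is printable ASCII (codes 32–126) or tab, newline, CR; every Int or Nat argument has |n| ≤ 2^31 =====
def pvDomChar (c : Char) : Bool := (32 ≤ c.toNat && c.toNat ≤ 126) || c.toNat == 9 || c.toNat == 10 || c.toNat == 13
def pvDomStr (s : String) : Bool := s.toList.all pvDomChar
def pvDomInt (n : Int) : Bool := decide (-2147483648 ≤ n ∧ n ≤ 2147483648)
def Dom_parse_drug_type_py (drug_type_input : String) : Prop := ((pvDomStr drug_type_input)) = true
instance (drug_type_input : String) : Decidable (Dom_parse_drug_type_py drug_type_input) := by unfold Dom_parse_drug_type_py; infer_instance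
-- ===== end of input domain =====

-- B replaces A's split-then-mutate-a-dict loop by a single streaming character scan with
-- four boolean accumulators (no split(), no dict mutation); objective: alternative.

-- ===== PORT A =====
-- A: split into tokens, then loop over tokens mutating a flag dict keyed by drug name.
def pvStepA (d : PySem.Dict String Bool) (t : String) : PySem.Dict String Bool :=
  let u := PySem.Str.upper t
  if d.contains u then d.insert u true else d

def parse_drug_type_py (drug_type_input : String) : List (String × Bool) :=
  let tokens := (PySem.Str.split? drug_type_input " ").getD []   -- sep ≠ "", so split? is some
  let m : PySem.Dict String Bool :=
    PySem.Dict.mk [("RIF", false), ("INH", false), ("PZA", false), ("EMB", false)]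
  -- isinstance(tokens, str) is always False here; the elif list branch runs.
  (tokens.foldl pvStepA m).items

-- ===== PORT B =====
-- B: stream over the characters of (input + " "); `word` (a Python str, kept here as its
-- List Char code points) accumulates the current token; a space flushes it into four flags.
def pvFlush (F : Bool × Bool × Bool × Bool) (w : List Char) : Bool × Bool × Bool × Bool :=
  let u := PySem.Chars.upper w
  (F.1 || (u == "RIF".toList), F.2.1 || (u == "INH".toList),
   F.2.2.1 || (u == "PZA".toList), F.2.2.2 || (u == "EMB".toList))

def pvScanStep (st : (Bool × Bool × Bool × Bool) × List Char) (ch : Char) :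
    (Bool × Bool × Bool × Bool) × List Char :=
  if ch == ' ' then (pvFlush st.1 st.2, []) else (st.1, st.2 ++ [ch])

def parse_drug_type_py_alt (drug_type_input : String) : List (String × Bool) :=
  let F := ((drug_type_input.toList ++ [' ']).foldl pvScanStep
              ((false, false, false, false), [])).1
  [("RIF", F.1), ("INH", F.2.1), ("PZA", F.2.2.1), ("EMB", F.2.2.2)]

-- ===== PRECONDITION & SPEC =====
def Spec_parse_drug_type_py (drug_type_input : String) (out : List (String × Bool)) : Prop := out = parse_drug_type_py_alt drug_type_input
instance (drug_type_input : String) (out : List (String × Bool)) : Decidable (Spec_parse_drug_type_py drug_type_input out) := by unfold Spec_parse_drug_type_py; infer_instance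

-- ===== CLAIM (what is proved, stated in full; the proofs are below) =====
def Claim_equal_parse_drug_type_py : Prop := ∀ (drug_type_input : String), Dom_parse_drug_type_py drug_type_input → Spec_parse_drug_type_py drug_type_input (parse_drug_type_py drug_type_input)

-- ===== LEMMAS AND PROOFS =====

-- One step of A's loop on the literal 4-key dict: each flag is or-ed with "this token is that key".
theorem pvStepA_mk (t : String) (a b c e : Bool) :
    pvStepA (PySem.Dict.mk [("RIF", a), ("INH", b), ("PZA", c), ("EMB", e)]) t
        = PySem.Dict.mk [("RIF", a || (PySem.Str.upper t == "RIF")),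
                         ("INH", b || (PySem.Str.upper t == "INH")),
                         ("PZA", c || (PySem.Str.upper t == "PZA")),
                         ("EMB", e || (PySem.Str.upper t == "EMB"))] := by
  simp only [pvStepA]
  generalize PySem.Str.upper t = u
  by_cases h1 : u = "RIF"
  · subst h1; simp [PySem.Dict.contains, PySem.Dict.insert]
  · by_cases h2 : u = "INH"
    · subst h2; simp [PySem.Dict.contains, PySem.Dict.insert]
    · by_cases h3 : u = "PZA"
      · subst h3; simp [PySem.Dict.contains, PySem.Dict.insert]
      · by_cases h4 : u = "EMB"
        · subst h4; simp [PySem.Dict.contains, PySem.Dict.insert]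
        · simp [PySem.Dict.contains, h1, h2, h3, h4, Ne.symm h1, Ne.symm h2, Ne.symm h3, Ne.symm h4]

-- Invariant of A's whole token loop over the literal 4-key dict.
theorem pvFoldA_items (ts : List String) : ∀ (a b c e : Bool),
    (ts.foldl pvStepA
      (PySem.Dict.mk [("RIF", a), ("INH", b), ("PZA", c), ("EMB", e)])).items
    = [("RIF", a || ts.any (fun t => PySem.Str.upper t == "RIF")),
       ("INH", b || ts.any (fun t => PySem.Str.upper t == "INH")),
       ("PZA", c || ts.any (fun t => PySem.Str.upper t == "PZA")),
       ("EMB", e || ts.any (fun t => PySem.Str.upper t == "EMB"))] := by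
  induction ts with
  | nil => intro a b c e; simp
  | cons t ts ih =>
    intro a b c e
    rw [List.foldl_cons, pvStepA_mk, ih]
    simp [Bool.or_assoc]

-- splitOn.go ignores its accumulator up to prepending it (reversed) to the result.
theorem pvGo_acc (fuel : Nat) : ∀ (l cur : List Char) (acc : List (List Char)),
    PySem.Chars.splitOn.go [' '] fuel l cur acc
      = acc.reverse ++ PySem.Chars.splitOn.go [' '] fuel l cur [] := by
  induction fuel with
  | zero => intro l cur acc; rw [PySem.Chars.splitOn.go.eq_def, PySem.Chars.splitOn.go.eq_def]; simp
  | succ fuel ih =>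
    intro l cur acc
    rw [PySem.Chars.splitOn.go.eq_def]
    conv_rhs => rw [PySem.Chars.splitOn.go.eq_def]
    cases l with
    | nil => simp
    | cons c rest =>
      by_cases h : [' '].isPrefixOf (c :: rest) = true
      · simp only [h, if_true]
        rw [ih _ _ (cur.reverse :: acc), ih _ _ [cur.reverse]]
        simp
      · simp only [h, Bool.false_eq_true, if_false]
        exact ih _ _ acc

-- B's character scan over (l ++ [' ']), started with partial word cur and flags F, equals
-- folding the flush over the tokens splitOn.go produces from l with reversed word cur.
theorem pvScan_go (l : List Char) : ∀ (fuel : Nat), l.length < fuel →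
    ∀ (cur : List Char) (F : Bool × Bool × Bool × Bool),
    ((l ++ [' ']).foldl pvScanStep (F, cur)).1
      = (PySem.Chars.splitOn.go [' '] fuel l cur.reverse []).foldl pvFlush F := by
  induction l with
  | nil =>
    intro fuel hf cur F
    obtain ⟨fuel, rfl⟩ := Nat.exists_eq_succ_of_ne_zero (by omega : fuel ≠ 0)
    rw [PySem.Chars.splitOn.go.eq_def]
    simp [pvScanStep]
  | cons c rest ih =>
    intro fuel hf cur F
    obtain ⟨fuel, rfl⟩ := Nat.exists_eq_succ_of_ne_zero (by omega : fuel ≠ 0)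
    rw [PySem.Chars.splitOn.go.eq_def]
    by_cases h : c = ' '
    · subst h
      have hp : [' '].isPrefixOf (' ' :: rest) = true := by simp [List.isPrefixOf]
      simp only [hp, if_true, List.length]
      rw [pvGo_acc, List.cons_append, List.foldl_cons]
      have : pvScanStep (F, cur) ' ' = (pvFlush F cur, []) := by simp [pvScanStep]
      rw [this, ih fuel (by simp at hf ⊢; omega) [] (pvFlush F cur)]
      simp
    · have hp : [' '].isPrefixOf (c :: rest) = false := by
        simp [List.isPrefixOf, Ne.symm h]
      simp only [hp, Bool.false_eq_true, if_false]
      rw [List.cons_append, List.foldl_cons]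
      have : pvScanStep (F, cur) c = (F, cur ++ [c]) := by simp [pvScanStep, h]
      rw [this, ih fuel (by simp at hf ⊢; omega) (cur ++ [c]) F]
      simp

-- Folding the flush over a token list just or-s each flag with an `any` over the tokens.
theorem pvFoldFlush (ts : List (List Char)) : ∀ (a b c e : Bool),
    ts.foldl pvFlush (a, b, c, e)
      = (a || ts.any (fun w => PySem.Chars.upper w == "RIF".toList),
         b || ts.any (fun w => PySem.Chars.upper w == "INH".toList),
         c || ts.any (fun w => PySem.Chars.upper w == "PZA".toList),
         e || ts.any (fun w => PySem.Chars.upper w == "EMB".toList)) := by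
  induction ts with
  | nil => intro a b c e; simp
  | cons t ts ih =>
    intro a b c e
    rw [List.foldl_cons]
    show ts.foldl pvFlush (pvFlush (a, b, c, e) t) = _
    rw [pvFlush, ih]
    simp [Bool.or_assoc]

-- String-level token test = char-level token test (A compares str tokens, B their code points).
theorem pvAny_bridge (ws : List (List Char)) (k : String) :
    ws.any ((fun t => PySem.Str.upper t == k) ∘ String.ofList)
      = ws.any (fun w => PySem.Chars.upper w == k.toList) := by
  refine List.any_congr rfl (fun w => ?_)
  show (PySem.Str.upper (String.ofList w) == k) = _
  rw [Bool.eq_iff_iff, beq_iff_eq, beq_iff_eq]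
  constructor
  · intro h
    have := congrArg String.toList h
    simp [PySem.Str.toList_upper] at this
    exact this
  · intro h
    apply String.toList_injective
    simp [PySem.Str.toList_upper]
    exact h

-- ===== VERDICT (by name: the statement is the Claim_ definition above) =====
theorem parse_drug_type_py_spec : Claim_equal_parse_drug_type_py := by
  intro s _
  unfold Spec_parse_drug_type_py parse_drug_type_py parse_drug_type_py_alt
  have hsplit : (PySem.Str.split? s " ").getD []
      = (PySem.Chars.splitOn s.toList [' ']).map String.ofList := by
    simp [PySem.Str.split?, PySem.Chars.split?]
  rw [hsplit, pvFoldA_items]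
  have hgo : PySem.Chars.splitOn s.toList [' ']
      = PySem.Chars.splitOn.go [' '] (s.toList.length + 1) s.toList [] [] := rfl
  rw [pvScan_go s.toList (s.toList.length + 1) (by omega) [] (false, false, false, false)]
  simp only [List.reverse_nil, ← hgo, pvFoldFlush]
  simp [pvAny_bridge]
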